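-- pv_equiv track=rewrite | github.com/gokaygunduz-gg/bolge-karma-2026 | federasyon/scorer.py | best_scores_sequence
-- ===== SOURCE A (Python) =====
-- def best_scores_sequence(event_scores: dict[tuple, int]) -> list[int]:
--     """
--     Tüm puanlanan branşlardan, "max 1 adet 50m" kısıtıyla
--     en yüksekten en düşüğe sıralanmış puan listesi.
--
--     Bu dizi sıralama için kullanılır:
--       - top3_total = sum(seq[:3])
--       - tiebreaker: seq[3], seq[4], ...
--
--     Algoritma (greedy):
--       - 50m branşları ayrı, 50m olmayan branşlar ayrı sıralanır
--       - 50m listesinden sadece en iyisi kullanılabilir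
--       - Her adımda: bir sonraki 50m ile bir sonraki non-50m karşılaştır,
--         büyük olanı al (50m kotası aşılmadan)
--     """
--     fifties = sorted(
--         [p for (s, d), p in event_scores.items() if d == 50 and p > 0],
--         reverse=True
--     )
--     non_fifties = sorted(
--         [p for (s, d), p in event_scores.items() if d != 50 and p > 0],
--         reverse=True
--     )
--
--     best_50 = fifties[0] if fifties else 0
--     result: list[int] = []
--     used_50 = False
--     i = 0
--
--     while True:
--         nf = non_fifties[i] if i < len(non_fifties) else -1
--         f  = best_50 if not used_50 else -1
--
--         if nf < 0 and f < 0: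
--             break
--         if f > nf:
--             result.append(f)
--             used_50 = True
--         else:
--             result.append(nf)
--             i += 1
--
--     return result
-- ===== SOURCE B (Python) =====
-- def best_scores_sequence(event_scores: dict[tuple, int]) -> list[int]:
--     fifties = [p for (s, d), p in event_scores.items() if d == 50 and p > 0]
--     non_fifties = [p for (s, d), p in event_scores.items() if d != 50 and p > 0]
--     best_50 = max(fifties) if fifties else 0
--     return sorted(non_fifties + [best_50], reverse=True)
-- ===== Notes on version B (the rewrite author's own statement) =====
-- stated objective: simpler
-- what changed: B drops A's whole while/merge loop and the separate descending sort of the 50m scores: it takes max(fifties) (default 0) directly and returns one descending sort of non_fifties + [best_50].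
import Mathlib
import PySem

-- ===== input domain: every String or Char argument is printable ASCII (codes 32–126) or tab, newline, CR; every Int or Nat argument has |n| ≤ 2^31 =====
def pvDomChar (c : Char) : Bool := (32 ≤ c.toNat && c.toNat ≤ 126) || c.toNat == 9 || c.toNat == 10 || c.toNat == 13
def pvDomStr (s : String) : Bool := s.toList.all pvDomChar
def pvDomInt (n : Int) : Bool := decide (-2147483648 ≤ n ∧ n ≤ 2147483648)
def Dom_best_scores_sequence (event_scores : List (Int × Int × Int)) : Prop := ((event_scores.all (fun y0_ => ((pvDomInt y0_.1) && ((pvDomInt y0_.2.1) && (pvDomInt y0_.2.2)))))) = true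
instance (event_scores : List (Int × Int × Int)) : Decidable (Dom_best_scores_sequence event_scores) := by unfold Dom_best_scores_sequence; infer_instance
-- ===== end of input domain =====

-- B replaces A's while/merge loop (and the separate sort of the 50m list) by a single
-- descending sort of non_fifties + [best_50]; objective: simpler.

-- ===== PORT A =====
-- the dict[tuple,int] argument arrives as its item list; rebuild the dict (last value
-- wins, first insertion position kept) exactly as Python's dict construction does
def bssDict (event_scores : List (Int × Int × Int)) : PySem.Dict (Int × Int) Int :=
  event_scores.foldl (fun d t => d.insert (t.1, t.2.1) t.2.2) PySem.Dict.empty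

-- the 'while True' merge loop of A, result built head-first instead of by append;
-- nf = non_fifties[i] if i < len(non_fifties) else -1 ;  f = best_50 if not used_50 else -1
def bssLoop (non_fifties : List Int) (best50 : Int) (used : Bool) (i : Nat) : List Int :=
  if non_fifties.getD i (-1) < 0 ∧ (if used then -1 else best50) < 0 then []
  else if (if used then -1 else best50) > non_fifties.getD i (-1) then
    (if used then -1 else best50) :: bssLoop non_fifties best50 true i
  else non_fifties.getD i (-1) :: bssLoop non_fifties best50 used (i + 1)
termination_by 2 * (non_fifties.length + 1 - i) + (if used then 0 else 1)
decreasing_by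
  · -- f-branch: used must be false (if used, f = -1 contradicts the guards)
    rename_i h1 h2
    cases used <;> (simp_all; try omega)
  · -- nf-branch: the guards force nf ≥ 0, hence i < length
    rename_i h1 h2
    have hi : i < non_fifties.length := by
      by_contra hge
      have hd : non_fifties.getD i (-1) = -1 := List.getD_eq_default _ _ (by omega)
      rw [hd] at h1 h2
      cases used <;> (simp_all; try omega)
    cases used <;> (simp; omega)

def best_scores_sequence (event_scores : List (Int × Int × Int)) : List Int :=
  let items := (bssDict event_scores).items
  let fifties := PySem.List.sorted
    ((items.filter (fun kv => kv.1.2 == 50 && decide (0 < kv.2))).map (fun kv => kv.2))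
    (fun x => x) true
  let non_fifties := PySem.List.sorted
    ((items.filter (fun kv => kv.1.2 != 50 && decide (0 < kv.2))).map (fun kv => kv.2))
    (fun x => x) true
  let best50 := fifties.headD 0          -- fifties[0] if fifties else 0
  bssLoop non_fifties best50 false 0

-- ===== PORT B =====
def best_scores_sequence_alt (event_scores : List (Int × Int × Int)) : List Int :=
  let items := (bssDict event_scores).items
  let fifties := (items.filter (fun kv => kv.1.2 == 50 && decide (0 < kv.2))).map (fun kv => kv.2)
  let non_fifties := (items.filter (fun kv => kv.1.2 != 50 && decide (0 < kv.2))).map (fun kv => kv.2)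
  let best50 := match PySem.List.max? fifties (fun x => x) with   -- max(fifties) if fifties else 0
    | some m => m
    | none => 0
  PySem.List.sorted (non_fifties ++ [best50]) (fun x => x) true

-- ===== PRECONDITION & SPEC =====
def Spec_best_scores_sequence (event_scores : List (Int × Int × Int)) (out : List Int) : Prop := out = best_scores_sequence_alt event_scores
instance (event_scores : List (Int × Int × Int)) (out : List Int) : Decidable (Spec_best_scores_sequence event_scores out) := by unfold Spec_best_scores_sequence; infer_instance

-- ===== CLAIM (what is proved, stated in full; the proofs are below) =====
def Claim_equal_best_scores_sequence : Prop := ∀ (event_scores : List (Int × Int × Int)), Dom_best_scores_sequence event_scores → Spec_best_scores_sequence event_scores (best_scores_sequence event_scores)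

-- ===== LEMMAS AND PROOFS =====

-- head of a descending sort, defaulted to 0, is max-with-default-0
lemma headD_sorted_rev_eq_max (xs : List Int) :
    (PySem.List.sorted xs (fun x => x) true).headD 0
      = (match PySem.List.max? xs (fun x => x) with | some m => m | none => 0) := by
  rcases hx : xs with _ | ⟨a, t⟩
  · simp [PySem.List.sorted, PySem.List.max?]
  · rcases hs : PySem.List.sorted (a :: t) (fun x => x) true with _ | ⟨m, s⟩
    · exact absurd hs (by simp [PySem.List.sorted_eq_nil_iff])
    rcases hm : PySem.List.max? (a :: t) (fun x => x) with _ | mx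
    · exact absurd hm (by simp [PySem.List.max?_eq_none_iff])
    have h1 : ∀ y ∈ (a :: t), y ≤ m := PySem.List.key_head_sorted_rev_ge _ (fun x => x) hs
    have h2 : ∀ y ∈ (a :: t), y ≤ mx := PySem.List.max?_isMax hm
    have hmmem : m ∈ (a :: t) := by
      have := PySem.List.mem_sorted (xs := a :: t) (key := fun x => x) (rev := true) (x := m)
      simp [hs] at this
      simpa using this
    have hmxmem : mx ∈ (a :: t) := PySem.List.max?_mem hm
    simp only [List.headD_cons]
    exact le_antisymm (h2 m hmmem) (h1 mx hmxmem)

-- once used_50 is set, the loop just copies the remaining (positive) non-fifties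
lemma bssLoop_true (L : List Int) (f : Int) (hpos : ∀ x ∈ L, 0 < x) :
    ∀ n i, L.length ≤ i + n → bssLoop L f true i = L.drop i := by
  intro n
  induction n with
  | zero =>
    intro i hi
    rw [bssLoop]
    rw [List.getD_eq_default _ _ (by omega), List.drop_eq_nil_of_le (by omega)]
    simp
  | succ n ih =>
    intro i hi
    by_cases hlt : i < L.length
    · have hd : L.getD i (-1) = L[i] := List.getD_eq_getElem L (-1) hlt
      have hx : 0 < L[i] := hpos _ (List.getElem_mem hlt)
      rw [bssLoop, hd]
      rw [if_neg (by simp; omega), if_neg (by simp; omega)]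
      rw [ih (i+1) (by omega)]
      rw [List.drop_eq_getElem_cons hlt]
    · rw [bssLoop]
      rw [List.getD_eq_default _ _ (by omega), List.drop_eq_nil_of_le (by omega)]
      simp

-- closed form of the merge loop with used_50 still false
lemma bssLoop_false (L : List Int) (f : Int) (hpos : ∀ x ∈ L, 0 < x) (hf : 0 ≤ f) :
    ∀ n i, L.length ≤ i + n →
      bssLoop L f false i
        = (L.drop i).takeWhile (fun x => decide (f ≤ x))
            ++ f :: (L.drop i).dropWhile (fun x => decide (f ≤ x)) := by
  intro n
  induction n with
  | zero =>
    intro i hi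
    rw [bssLoop]
    rw [List.getD_eq_default _ _ (by omega), List.drop_eq_nil_of_le (by omega)]
    rw [if_neg (by simp; omega), if_pos (by simp; omega)]
    rw [bssLoop_true L f hpos 0 i (by omega), List.drop_eq_nil_of_le (by omega)]
    simp
  | succ n ih =>
    intro i hi
    by_cases hlt : i < L.length
    · have hd : L.getD i (-1) = L[i] := List.getD_eq_getElem L (-1) hlt
      have hx : 0 < L[i] := hpos _ (List.getElem_mem hlt)
      rw [List.drop_eq_getElem_cons hlt]
      by_cases hle : f ≤ L[i]
      · rw [bssLoop, hd, if_neg (by simp; omega), if_neg (by simp; omega)]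
        rw [ih (i+1) (by omega)]
        rw [List.takeWhile_cons_of_pos (by simp [hle]), List.dropWhile_cons_of_pos (by simp [hle])]
        simp
      · rw [bssLoop, hd, if_neg (by simp; omega), if_pos (by simp; omega)]
        rw [bssLoop_true L f hpos (n+1) i (by omega)]
        rw [List.takeWhile_cons_of_neg (by simp; omega), List.dropWhile_cons_of_neg (by simp; omega)]
        rw [List.drop_eq_getElem_cons hlt]
        simp
    · rw [bssLoop]
      rw [List.getD_eq_default _ _ (by omega), List.drop_eq_nil_of_le (by omega)]
      rw [if_neg (by simp; omega), if_pos (by simp; omega)]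
      rw [bssLoop_true L f hpos 0 i (by omega), List.drop_eq_nil_of_le (by omega)]
      simp

-- everything the merge loop puts after f is strictly below f
lemma dropWhile_lt (L : List Int) (f : Int) (hsort : L.Pairwise (· ≥ ·)) :
    ∀ b ∈ L.dropWhile (fun x => decide (f ≤ x)), b < f := by
  intro b hb
  rcases hD : L.dropWhile (fun x => decide (f ≤ x)) with _ | ⟨d, D'⟩
  · simp [hD] at hb
  have hdf : ¬ (f ≤ d) := by
    have := List.head_dropWhile_not (fun x => decide (f ≤ x)) (l := L) (w := by simp [hD])
    simpa [hD] using this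
  have hsub : (d :: D').Pairwise (· ≥ ·) := hD ▸ hsort.sublist (List.dropWhile_sublist _)
  rw [hD] at hb
  rcases List.mem_cons.mp hb with rfl | hmem
  · omega
  · have : d ≥ b := (List.pairwise_cons.mp hsub).1 b hmem
    omega

-- the merged list is descending
lemma merged_pairwise (L : List Int) (f : Int) (hsort : L.Pairwise (· ≥ ·)) :
    (L.takeWhile (fun x => decide (f ≤ x))
      ++ f :: L.dropWhile (fun x => decide (f ≤ x))).Pairwise (· ≥ ·) := by
  have hTD : L.takeWhile (fun x => decide (f ≤ x)) ++ L.dropWhile (fun x => decide (f ≤ x)) = L :=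
    List.takeWhile_append_dropWhile
  rw [List.pairwise_append]
  refine ⟨(hTD ▸ hsort).sublist (List.sublist_append_left _ _), ?_, ?_⟩
  · rw [List.pairwise_cons]
    exact ⟨fun b hb => le_of_lt (dropWhile_lt L f hsort b hb),
      (hTD ▸ hsort).sublist (List.sublist_append_right _ _)⟩
  · intro a ha b hb
    have haf : f ≤ a := by simpa using List.mem_takeWhile_imp ha
    rcases List.mem_cons.mp hb with rfl | hmem
    · exact haf
    · have := dropWhile_lt L f hsort b hmem
      omega

-- the merged list is a rearrangement of L ++ [f]
lemma merged_perm (L : List Int) (f : Int) :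
    (L.takeWhile (fun x => decide (f ≤ x))
      ++ f :: L.dropWhile (fun x => decide (f ≤ x))).Perm (L ++ [f]) := by
  have h1 : (L.takeWhile (fun x => decide (f ≤ x))
      ++ f :: L.dropWhile (fun x => decide (f ≤ x))).Perm
      (f :: (L.takeWhile (fun x => decide (f ≤ x)) ++ L.dropWhile (fun x => decide (f ≤ x)))) :=
    List.perm_middle
  rw [List.takeWhile_append_dropWhile] at h1
  exact h1.trans (List.perm_append_singleton f L).symm

-- the merge of the descending-sorted list with the extra element f is the descending sort
-- of the unsorted list with f appended
lemma bssLoop_sorted (N : List Int) (f : Int) (hpos : ∀ x ∈ N, 0 < x) (hf : 0 ≤ f) :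
    bssLoop (PySem.List.sorted N (fun x => x) true) f false 0
      = PySem.List.sorted (N ++ [f]) (fun x => x) true := by
  have hLperm : (PySem.List.sorted N (fun x => x) true).Perm N := PySem.List.sorted_perm N _ _
  have hLpos : ∀ x ∈ PySem.List.sorted N (fun x => x) true, 0 < x :=
    fun x hx => hpos x (hLperm.mem_iff.mp hx)
  have hLsort : (PySem.List.sorted N (fun x => x) true).Pairwise (· ≥ ·) := by
    simpa [ge_iff_le] using PySem.List.sorted_pairwise_rev (xs := N) (key := fun x => x)
  rw [bssLoop_false _ f hLpos hf (PySem.List.sorted N (fun x => x) true).length 0 (by omega)]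
  simp only [List.drop_zero]
  have hperm : (List.takeWhile (fun x => decide (f ≤ x)) (PySem.List.sorted N (fun x => x) true)
      ++ f :: List.dropWhile (fun x => decide (f ≤ x)) (PySem.List.sorted N (fun x => x) true)).Perm
      (PySem.List.sorted (N ++ [f]) (fun x => x) true) :=
    (merged_perm _ f).trans
      ((hLperm.append_right [f]).trans (PySem.List.sorted_perm (N ++ [f]) _ _).symm)
  have hS : (PySem.List.sorted (N ++ [f]) (fun x => x) true).Pairwise (· ≥ ·) := by
    simpa [ge_iff_le] using PySem.List.sorted_pairwise_rev (xs := N ++ [f]) (key := fun x => x)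
  exact hperm.eq_of_pairwise (fun _ _ _ _ hab hba => le_antisymm hba hab)
    (merged_pairwise _ f hLsort) hS

-- ===== VERDICT (by name: the statement is the Claim_ definition above) =====
theorem best_scores_sequence_spec : Claim_equal_best_scores_sequence := by
  intro es _
  unfold Spec_best_scores_sequence best_scores_sequence best_scores_sequence_alt
  simp only []
  rw [headD_sorted_rev_eq_max]
  apply bssLoop_sorted
  · intro x hx
    simp only [List.mem_map, List.mem_filter] at hx
    rcases hx with ⟨kv, ⟨_, hp⟩, rfl⟩
    simpa using (Bool.and_elim_right hp)
  · rcases hm : PySem.List.max?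
        (((bssDict es).items.filter (fun kv => kv.1.2 == 50 && decide (0 < kv.2))).map
          (fun kv => kv.2)) (fun x => x) with _ | mx
    · rw [hm]
    · rw [hm]
      have hmem := PySem.List.max?_mem hm
      simp only [List.mem_map, List.mem_filter] at hmem
      rcases hmem with ⟨kv, ⟨_, hp⟩, rfl⟩
      have h0 : 0 < kv.2 := of_decide_eq_true (Bool.and_elim_right hp)
      exact le_of_lt h0
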